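-- pv_equiv track=rewrite | github.com/JasonGross/coq-tools | coq_tools/custom_arguments.py | tokenize_CoqProject
-- ===== SOURCE A (Python) =====
-- def tokenize_CoqProject(contents):
--     is_in_string = False
--     is_in_comment = False
--     cur = ""
--     for ch in contents:
--         if is_in_string:
--             cur += ch
--             if ch == '"':
--                 yield cur
--                 cur = ""
--                 is_in_string = False
--         elif is_in_comment:
--             if ch in "\n\r":
--                 is_in_comment = False
--         elif ch == '"':
--             cur += ch
--             is_in_string = True
--         elif ch == "#":
--             if cur:
--                 yield cur
--             cur = ""
--             is_in_comment = True
--         else: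
--             if ch in "\n\r\t ":
--                 if cur:
--                     yield cur
--                 cur = ""
--             else:
--                 cur += ch
--     if cur:
--         yield cur
-- ===== SOURCE B (Python) =====
-- def tokenize_CoqProject(contents):
--     # Position-based scanner: skip whitespace and comments, then slice whole
--     # tokens (optionally word + quoted string) out of the input in one step.
--     i, n = 0, len(contents)
--     while i < n:
--         ch = contents[i]
--         if ch in " \t\n\r":
--             i += 1
--         elif ch == '#':
--             while i < n and contents[i] not in "\n\r":
--                 i += 1
--         else:
--             j = i
--             while j < n and contents[j] not in ' \t\n\r#"':
--                 j += 1
--             if j < n and contents[j] == '"':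
--                 k = contents.find('"', j + 1)
--                 if k == -1:
--                     yield contents[i:]
--                     return
--                 yield contents[i:k + 1]
--                 i = k + 1
--             else:
--                 yield contents[i:j]
--                 i = j
-- ===== Notes on version B (the rewrite author's own statement) =====
-- stated objective: alternative
-- what changed: Replaces A's char-by-char generator with three state flags and a growing accumulator by a position-based scanner that skips whitespace/comments and slices each whole token (bare word plus optional quoted part, found via str.find) directly out of the input.
import Mathlib
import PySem

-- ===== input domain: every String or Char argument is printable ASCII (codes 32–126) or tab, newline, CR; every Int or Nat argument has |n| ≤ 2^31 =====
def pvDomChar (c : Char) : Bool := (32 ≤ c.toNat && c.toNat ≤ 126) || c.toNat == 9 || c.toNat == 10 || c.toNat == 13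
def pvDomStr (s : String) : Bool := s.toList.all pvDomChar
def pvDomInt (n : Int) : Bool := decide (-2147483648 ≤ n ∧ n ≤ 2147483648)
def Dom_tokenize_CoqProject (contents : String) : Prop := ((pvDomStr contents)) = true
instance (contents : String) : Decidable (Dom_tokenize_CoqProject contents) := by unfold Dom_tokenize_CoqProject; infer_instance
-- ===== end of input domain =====

-- B replaces A's char-by-char three-flag state machine by a position-based scanner that
-- slices whole tokens (word + optional quoted part) out of the input (objective: alternative).

-- ===== PORT A =====
-- state: (is_in_string, is_in_comment, cur, tokens yielded so far)
def pvStepA (st : Bool × Bool × List Char × List String) (ch : Char) :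
    Bool × Bool × List Char × List String :=
  match st with
  | (isStr, isCom, cur, acc) =>
    if isStr then
      if ch == '"' then (false, isCom, [], acc ++ [String.ofList (cur ++ [ch])])
      else (true, isCom, cur ++ [ch], acc)
    else if isCom then
      if ch == '\n' || ch == '\r' then (isStr, false, cur, acc) else (isStr, isCom, cur, acc)
    else if ch == '"' then (true, isCom, cur ++ [ch], acc)
    else if ch == '#' then (isStr, true, [], acc ++ (if cur = [] then [] else [String.ofList cur]))
    else if ch == '\n' || ch == '\r' || ch == '\t' || ch == ' ' then
      (isStr, isCom, [], acc ++ (if cur = [] then [] else [String.ofList cur]))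
    else (isStr, isCom, cur ++ [ch], acc)

def pvFinishA (st : Bool × Bool × List Char × List String) : List String :=
  match st with
  | (_, _, cur, acc) => acc ++ (if cur = [] then [] else [String.ofList cur])

def tokenize_CoqProject (contents : String) : List String :=
  pvFinishA (contents.toList.foldl pvStepA (false, false, [], []))

-- ===== PORT B =====
def pvIsWS (c : Char) : Bool := c == ' ' || c == '\t' || c == '\n' || c == '\r'
def pvIsStop (c : Char) : Bool := pvIsWS c || c == '#' || c == '"'

-- the inner `while i < n and contents[i] not in "\n\r"` loop of Source B
def pvDropComment : List Char → List Char
  | [] => []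
  | c :: r => if c == '\n' || c == '\r' then c :: r else pvDropComment r

theorem pvDropComment_length_le (l : List Char) : (pvDropComment l).length ≤ l.length := by
  induction l with
  | nil => simp [pvDropComment]
  | cons c r ih => unfold pvDropComment; split; · simp
                   · simp; omega

-- the outer `while i < n` loop of Source B, on the remaining suffix; `takeWhile` is the
-- word-scanning inner loop, the takeWhile over (· != '"') is contents.find('"', j+1)
def pvTokB : List Char → List String
  | [] => []
  | c :: r =>
    if pvIsWS c then pvTokB r
    else if c == '#' then pvTokB (pvDropComment r)
    else
      let w := (c :: r).takeWhile (fun d => !pvIsStop d)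
      match hrest : (c :: r).drop w.length with
      | [] => [String.ofList w]
      | d :: r' =>
        if d == '"' then
          let s := r'.takeWhile (fun e => e != '"')
          if s.length = r'.length then [String.ofList (w ++ '"' :: r')]
          else String.ofList (w ++ '"' :: s ++ ['"']) :: pvTokB (r'.drop (s.length + 1))
        else String.ofList w :: pvTokB (d :: r')
termination_by l => l.length
decreasing_by
  · simp
  · have := pvDropComment_length_le r; simp; omega
  · have h : (List.drop (List.takeWhile (fun d => !pvIsStop d) (c :: r)).length (c :: r)).length = (d :: r').length := congrArg List.length hrest
    simp at h
    have h2 := (List.takeWhile_sublist (p := fun d => !pvIsStop d) (l := c :: r)).length_le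
    simp at h2 ⊢
    omega
  · rename_i hws hh hd
    have h : (List.drop (List.takeWhile (fun d => !pvIsStop d) (c :: r)).length (c :: r)).length = (d :: r').length := congrArg List.length hrest
    by_cases hc : pvIsStop c = true
    · exfalso
      have hceq : c = '"' := by
        simp [pvIsStop, pvIsWS] at hc
        simp [pvIsWS] at hws
        rcases hc with h1 | h1 | h1 <;> simp_all
      have hw0 : (List.takeWhile (fun d => !pvIsStop d) (c :: r)) = [] := by
        rw [List.takeWhile_cons]; simp [hc]
      have hrest' : List.drop (List.takeWhile (fun d => !pvIsStop d) (c :: r)).length (c :: r) = d :: r' := hrest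
      rw [hw0] at hrest'
      simp at hrest'
      apply hd
      rw [← hrest'.1, hceq]; decide
    · have hnz : (List.takeWhile (fun d => !pvIsStop d) (c :: r)) = c :: (List.takeWhile (fun d => !pvIsStop d) r) := by
        rw [List.takeWhile_cons]; simp [hc]
      rw [hnz] at h
      simp at h ⊢
      omega

def tokenize_CoqProject_alt (contents : String) : List String :=
  pvTokB contents.toList

-- ===== PRECONDITION & SPEC =====
def Spec_tokenize_CoqProject (contents : String) (out : List String) : Prop := out = tokenize_CoqProject_alt contents
instance (contents : String) (out : List String) : Decidable (Spec_tokenize_CoqProject contents out) := by unfold Spec_tokenize_CoqProject; infer_instance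

-- ===== CLAIM (what is proved, stated in full; the proofs are below) =====
def Claim_equal_tokenize_CoqProject : Prop := ∀ (contents : String), Dom_tokenize_CoqProject contents → Spec_tokenize_CoqProject contents (tokenize_CoqProject contents)

-- ===== LEMMAS AND PROOFS =====

def pvEmit (cur : List Char) : List String := if cur = [] then [] else [String.ofList cur]

-- A's state machine on word state with pending word `cur`
def pvWtok : List Char → List Char → List String
  | cur, [] => pvEmit cur
  | cur, c :: r =>
    if pvIsWS c then pvEmit cur ++ pvTokB r
    else if c == '#' then pvEmit cur ++ pvTokB (pvDropComment r)
    else if c == '"' then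
      let s := r.takeWhile (fun e => e != '"')
      if s.length = r.length then [String.ofList (cur ++ '"' :: r)]
      else String.ofList (cur ++ '"' :: s ++ ['"']) :: pvTokB (r.drop (s.length + 1))
    else pvWtok (cur ++ [c]) r

-- pvTokB's word step, generalized over an already-collected prefix `cur`
def pvAuxB (cur l : List Char) : List String :=
  let w := l.takeWhile (fun d => !pvIsStop d)
  match l.drop w.length with
  | [] => pvEmit (cur ++ w)
  | d :: r' =>
    if d == '"' then
      let s := r'.takeWhile (fun e => e != '"')
      if s.length = r'.length then [String.ofList (cur ++ w ++ '"' :: r')]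
      else String.ofList (cur ++ w ++ '"' :: s ++ ['"']) :: pvTokB (r'.drop (s.length + 1))
    else pvEmit (cur ++ w) ++ pvTokB (d :: r')

theorem pvTokB_ws {c : Char} (r : List Char) (h : pvIsWS c = true) : pvTokB (c :: r) = pvTokB r := by
  rw [pvTokB]; simp [h]

theorem pvTokB_hash (r : List Char) : pvTokB ('#' :: r) = pvTokB (pvDropComment r) := by
  rw [pvTokB]; simp [pvIsWS]

theorem pvTokB_quote (r : List Char) : pvTokB ('"' :: r) =
    (if (r.takeWhile (fun e => e != '"')).length = r.length then [String.ofList ('"' :: r)]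
     else String.ofList ('"' :: r.takeWhile (fun e => e != '"') ++ ['"']) ::
       pvTokB (r.drop ((r.takeWhile (fun e => e != '"')).length + 1))) := by
  rw [pvTokB]
  have h1 : pvIsWS '"' = false := by decide
  have h2 : (('"' : Char) == '#') = false := by decide
  have h3 : pvIsStop '"' = true := by decide
  simp only [h1, h2, Bool.false_eq_true, if_false]
  split
  · rename_i hrest
    exfalso
    simp [h3] at hrest
  · rename_i d r' hrest
    simp [h3] at hrest
    obtain ⟨hd, hr⟩ := hrest
    subst hd; subst hr
    have hw : List.takeWhile (fun d => !pvIsStop d) ('"' :: r) = [] := by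
      simp [h3]
    simp [hw]

theorem pvTokB_word {c : Char} (r : List Char) (h : pvIsStop c = false) :
    pvTokB (c :: r) = pvAuxB [] (c :: r) := by
  have h3 : pvIsWS c = false ∧ (c == '#') = false ∧ (c == '"') = false := by
    simpa [pvIsStop, and_assoc] using h
  have hw : List.takeWhile (fun d => !pvIsStop d) (c :: r)
      = c :: r.takeWhile (fun d => !pvIsStop d) := by
    simp [h]
  rw [pvTokB]
  simp only [h3.1, h3.2.1, Bool.false_eq_true, if_false]
  split
  · rename_i hrest
    rw [hw, List.length_cons, List.drop_succ_cons] at hrest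
    simp [pvAuxB, hw, hrest, pvEmit]
  · rename_i d r' hrest
    rw [hw, List.length_cons, List.drop_succ_cons] at hrest
    simp only [pvAuxB, hw, List.length_cons, List.drop_succ_cons, hrest]
    split
    · simp
    · simp [pvEmit]

theorem pv_ws_not_quote_hash {c : Char} (h : pvIsWS c = true) :
    (c == '"') = false ∧ (c == '#') = false := by
  simp [pvIsWS] at h
  rcases h with ((h | h) | h) | h <;> subst h <;> exact ⟨by decide, by decide⟩

theorem pvAuxB_stop {c : Char} (r cur : List Char) (h : pvIsStop c = true)
    (hq : (c == '"') = false) :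
    pvAuxB cur (c :: r) = pvEmit cur ++ pvTokB (c :: r) := by
  have hw : List.takeWhile (fun d => !pvIsStop d) (c :: r) = [] := by
    simp [h]
  simp [pvAuxB, hw, hq]

theorem pvAuxB_word {c : Char} (r cur : List Char) (h : pvIsStop c = false) :
    pvAuxB cur (c :: r) = pvAuxB (cur ++ [c]) r := by
  have hw : List.takeWhile (fun d => !pvIsStop d) (c :: r)
      = c :: r.takeWhile (fun d => !pvIsStop d) := by
    simp [h]
  simp only [pvAuxB, hw, List.length_cons, List.drop_succ_cons]
  split
  · simp [pvEmit]
  · split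
    · split <;> simp
    · simp [pvEmit]

theorem pvAuxB_quote (r cur : List Char) :
    pvAuxB cur ('"' :: r) =
      (if (r.takeWhile (fun e => e != '"')).length = r.length then
        [String.ofList (cur ++ '"' :: r)]
      else String.ofList (cur ++ '"' :: r.takeWhile (fun e => e != '"') ++ ['"']) ::
        pvTokB (r.drop ((r.takeWhile (fun e => e != '"')).length + 1))) := by
  have hw : List.takeWhile (fun d => !pvIsStop d) ('"' :: r) = [] := by
    simp [show pvIsStop '"' = true by decide]
  simp [pvAuxB, hw]

theorem pv_auxB_tokB (l : List Char) : pvAuxB [] l = pvTokB l := by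
  cases l with
  | nil => simp [pvAuxB, pvTokB, pvEmit]
  | cons c r =>
    by_cases hst : pvIsStop c = true
    · by_cases hq : (c == '"') = true
      · have hc : c = '"' := by simpa using hq
        subst hc
        rw [pvAuxB_quote, pvTokB_quote]
        simp
      · rw [pvAuxB_stop r [] hst (by simpa using hq)]
        simp [pvEmit]
    · exact (pvTokB_word r (by simpa using hst)).symm

theorem pv_wtok_aux (l : List Char) : ∀ cur, pvWtok cur l = pvAuxB cur l := by
  induction l with
  | nil => intro cur; simp [pvWtok, pvAuxB, pvEmit]
  | cons c r ih =>
    intro cur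
    by_cases hws : pvIsWS c = true
    · have hst : pvIsStop c = true := by simp [pvIsStop, hws]
      obtain ⟨hq, hh⟩ := pv_ws_not_quote_hash hws
      simp only [pvWtok, hws, if_true]
      rw [pvAuxB_stop r cur hst hq, pvTokB_ws r hws]
    · by_cases hh : (c == '#') = true
      · have hc : c = '#' := by simpa using hh
        subst hc
        simp only [pvWtok, show pvIsWS '#' = false by decide,
          show (('#' : Char) == '#') = true by decide, Bool.false_eq_true, if_false, if_true]
        rw [pvAuxB_stop r cur (by decide) (by decide), pvTokB_hash r]
      · by_cases hq : (c == '"') = true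
        · have hc : c = '"' := by simpa using hq
          subst hc
          rw [pvAuxB_quote]
          simp only [pvWtok, show pvIsWS '"' = false by decide,
            show (('"' : Char) == '#') = false by decide,
            show (('"' : Char) == '"') = true by decide, Bool.false_eq_true, if_false, if_true]
        · simp only [pvWtok, hws, hh, hq, Bool.false_eq_true, if_false]
          rw [ih (cur ++ [c]),
            pvAuxB_word r cur (by simp [pvIsStop, hws, hh, hq])]

theorem pv_wsflip (c : Char) :
    (c == '\n' || c == '\r' || c == '\t' || c == ' ') = pvIsWS c := by
  cases h1 : c == ' ' <;> cases h2 : c == '\t' <;> cases h3 : c == '\n' <;>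
    cases h4 : c == '\r' <;> simp [pvIsWS, h1, h2, h3, h4]

theorem pv_wtok_nil (l : List Char) : pvWtok [] l = pvTokB l :=
  (pv_wtok_aux l []).trans (pv_auxB_tokB l)

theorem pv_comment (l : List Char) : ∀ (acc : List String),
    pvFinishA (l.foldl pvStepA (false, true, [], acc)) =
      pvFinishA ((pvDropComment l).foldl pvStepA (false, false, [], acc)) := by
  induction l with
  | nil => intro acc; simp [pvDropComment, pvFinishA]
  | cons c r ih =>
    intro acc
    simp only [List.foldl_cons, pvDropComment]
    by_cases hnl : (c == '\n' || c == '\r') = true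
    · rw [if_pos hnl]
      simp only [List.foldl_cons]
      have hq : (c == '"') = false := by
        rcases Bool.or_eq_true_iff.mp hnl with h | h <;> simp_all
      have hh : (c == '#') = false := by
        rcases Bool.or_eq_true_iff.mp hnl with h | h <;> simp_all
      simp [pvStepA, hq, hh, hnl]
    · rw [if_neg hnl]
      simp only [pvStepA, Bool.false_eq_true, if_false, if_true, hnl]
      exact ih acc

theorem pv_string (l : List Char) : ∀ (cur : List Char) (acc : List String), cur ≠ [] →
    pvFinishA (l.foldl pvStepA (true, false, cur, acc)) =
      (if (l.takeWhile (fun e => e != '"')).length = l.length then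
        acc ++ [String.ofList (cur ++ l)]
      else
        pvFinishA ((l.drop ((l.takeWhile (fun e => e != '"')).length + 1)).foldl pvStepA
          (false, false, [], acc ++ [String.ofList (cur ++ l.takeWhile (fun e => e != '"') ++ ['"'])]))) := by
  induction l with
  | nil =>
    intro cur acc hcur
    simp [pvFinishA, hcur]
  | cons c r ih =>
    intro cur acc hcur
    rw [List.takeWhile_cons]
    by_cases hq : (c == '"') = true
    · have hc : c = '"' := by simpa using hq
      subst hc
      have h1 : (('"' : Char) == '"') = true := by decide
      have h2 : (('"' : Char) != '"') = false := by decide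
      simp only [List.foldl_cons, pvStepA, h1, h2, if_true, Bool.false_eq_true, if_false,
        List.length_nil, List.length_cons, List.drop_succ_cons, List.drop_zero]
      rw [if_neg (by omega)]
      simp
    · have hbne : (c != '"') = true := by simpa using hq
      rw [hbne]
      simp only [if_true]
      simp only [List.foldl_cons, pvStepA, if_true, hq, Bool.false_eq_true, if_false]
      rw [ih (cur ++ [c]) acc (by simp)]
      by_cases hl : (r.takeWhile (fun e => e != '"')).length = r.length
      · rw [if_pos hl, if_pos (by simp [hl])]
        simp
      · rw [if_neg hl, if_neg (by simp [hl])]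
        simp only [List.length_cons, List.drop_succ_cons, List.append_assoc,
          List.cons_append, List.nil_append]

theorem pv_main (n : Nat) : ∀ (l : List Char), l.length ≤ n → ∀ (cur : List Char) (acc : List String),
    pvFinishA (l.foldl pvStepA (false, false, cur, acc)) = acc ++ pvWtok cur l := by
  induction n with
  | zero =>
    intro l hl cur acc
    have hnil : l = [] := by cases l with
      | nil => rfl
      | cons a b => simp at hl
    subst hnil
    simp [pvFinishA, pvWtok, pvEmit]
  | succ n ih =>
    intro l hl cur acc
    cases l with
    | nil => simp [pvFinishA, pvWtok, pvEmit]
    | cons c r =>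
      have hr : r.length ≤ n := by simp at hl; omega
      by_cases hq : (c == '"') = true
      · have hc : c = '"' := by simpa using hq
        subst hc
        simp only [List.foldl_cons, pvStepA, Bool.false_eq_true, if_false,
          show (('"' : Char) == '"') = true from by decide, if_true]
        rw [pv_string r (cur ++ ['"']) acc (by simp)]
        simp only [pvWtok, show pvIsWS '"' = false from by decide,
          show (('"' : Char) == '#') = false from by decide,
          show (('"' : Char) == '"') = true from by decide, Bool.false_eq_true, if_false, if_true]
        by_cases hlen : (r.takeWhile (fun e => e != '"')).length = r.length
        · rw [if_pos hlen, if_pos hlen]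
          simp
        · rw [if_neg hlen, if_neg hlen]
          have hd : (r.drop ((r.takeWhile (fun e => e != '"')).length + 1)).length ≤ n := by
            have : (r.drop ((r.takeWhile (fun e => e != '"')).length + 1)).length
                = r.length - ((r.takeWhile (fun e => e != '"')).length + 1) := List.length_drop
            omega
          rw [ih _ hd [] _, pv_wtok_nil]
          simp
      · by_cases hh : (c == '#') = true
        · have hc : c = '#' := by simpa using hh
          subst hc
          simp only [List.foldl_cons, pvStepA, Bool.false_eq_true, if_false,
            show (('#' : Char) == '"') = false from by decide,
            show (('#' : Char) == '#') = true from by decide, if_true]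
          rw [pv_comment r, ih _ (le_trans (pvDropComment_length_le r) hr) [] _, pv_wtok_nil]
          simp only [pvWtok, show pvIsWS '#' = false from by decide,
            show (('#' : Char) == '#') = true from by decide, Bool.false_eq_true, if_false, if_true]
          simp [pvEmit]
        · by_cases hws : pvIsWS c = true
          · have hws' : (c == '\n' || c == '\r' || c == '\t' || c == ' ') = true := by
              rw [pv_wsflip]; exact hws
            obtain ⟨hq', hh'⟩ := pv_ws_not_quote_hash hws
            simp only [List.foldl_cons, pvStepA, Bool.false_eq_true, if_false,
              hq', hh', hws', if_true]
            rw [ih r hr [] _, pv_wtok_nil]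
            simp only [pvWtok, hws, if_true]
            simp [pvEmit]
          · have hws' : (c == '\n' || c == '\r' || c == '\t' || c == ' ') = false := by
              rw [pv_wsflip]; simpa using hws
            simp only [List.foldl_cons, pvStepA, Bool.false_eq_true, if_false,
              hq, hh, hws']
            rw [ih r hr (cur ++ [c]) acc]
            simp only [pvWtok, hws, hq, hh, Bool.false_eq_true, if_false]

-- ===== VERDICT (by name: the statement is the Claim_ definition above) =====
theorem tokenize_CoqProject_spec : Claim_equal_tokenize_CoqProject := by
  intro contents _
  unfold Spec_tokenize_CoqProject tokenize_CoqProject tokenize_CoqProject_alt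
  rw [pv_main contents.toList.length contents.toList le_rfl [] []]
  rw [pv_wtok_nil]
  simp
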